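-- pv_equiv track=rewrite | github.com/Balaji-2001/ATS_Resume_Analyzer | streamlit_app.py | analyze_resume_keywords
-- ===== SOURCE A (Python) =====
-- def analyze_resume_keywords(resume_text, jd_keywords):
--     """Find matches + missing keywords"""
--     resume_lower = resume_text.lower()
--     matched = []
--     missing = []
--
--     for kw in jd_keywords:
--         if kw.lower() in resume_lower:
--             matched.append(kw.upper())
--         else:
--             missing.append(kw.upper())
--
--     return matched, missing
-- ===== SOURCE B (Python) =====
-- def analyze_resume_keywords(resume_text, jd_keywords):
--     """Index the lowered resume once: collect every substring whose length occurs
--     among the keyword lengths into a set, then classify keywords by set lookup."""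
--     resume_lower = resume_text.lower()
--     n = len(resume_lower)
--     subs = set()
--     for L in {len(kw) for kw in jd_keywords}:
--         for i in range(n - L + 1):
--             subs.add(resume_lower[i:i + L])
--     matched = [kw.upper() for kw in jd_keywords if kw.lower() in subs]
--     missing = [kw.upper() for kw in jd_keywords if kw.lower() not in subs]
--     return matched, missing
-- ===== Notes on version B (the rewrite author's own statement) =====
-- stated objective: faster
-- what changed: B builds a hash-set index of all resume substrings at the distinct keyword lengths in one scan per distinct length, then classifies every keyword with an O(1) set lookup, replacing A's O(N) substring search per keyword.
import Mathlib
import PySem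

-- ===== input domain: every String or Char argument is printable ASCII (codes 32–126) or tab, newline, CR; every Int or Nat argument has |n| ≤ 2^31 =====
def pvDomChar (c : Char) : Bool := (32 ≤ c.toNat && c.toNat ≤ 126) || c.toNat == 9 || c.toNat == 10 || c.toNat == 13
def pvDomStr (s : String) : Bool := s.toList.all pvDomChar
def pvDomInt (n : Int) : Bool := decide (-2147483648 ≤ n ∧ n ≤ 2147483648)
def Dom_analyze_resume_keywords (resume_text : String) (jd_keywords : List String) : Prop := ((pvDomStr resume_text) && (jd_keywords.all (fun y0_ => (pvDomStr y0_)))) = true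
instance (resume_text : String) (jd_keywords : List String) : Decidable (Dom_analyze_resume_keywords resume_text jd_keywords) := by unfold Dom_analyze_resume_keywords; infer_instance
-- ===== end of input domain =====

-- B indexes the lowered resume once (a set of all its substrings at the distinct
-- keyword lengths) and classifies keywords by set lookup — alternative algorithm, same results.

-- ===== PORT A =====
-- literal transliteration of A: lowercase the resume once, forward loop, append to matched/missing
def analyze_resume_keywords (resume_text : String) (jd_keywords : List String) : List String × List String :=
  let resume_lower := PySem.Str.lower resume_text
  jd_keywords.foldl
    (fun (acc : List String × List String) kw =>
      if PySem.Str.isIn (PySem.Str.lower kw) resume_lower then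
        (acc.1 ++ [PySem.Str.upper kw], acc.2)
      else
        (acc.1, acc.2 ++ [PySem.Str.upper kw]))
    ([], [])

-- ===== PORT B =====
-- literal transliteration of B: build the substring set over the distinct keyword
-- lengths, then two filtering comprehensions classified by set membership
def analyze_resume_keywords_alt (resume_text : String) (jd_keywords : List String) : List String × List String :=
  let resume_lower := PySem.Str.lower resume_text
  let n : Int := PySem.Str.len resume_lower
  let subs : PySem.Set String :=
    (PySem.Set.ofList (jd_keywords.map (fun kw => PySem.Str.len kw))).foldl
      (fun s L =>
        (PySem.List.pyRange 0 (n - L + 1) 1).foldl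
          (fun s i => PySem.Set.add s (PySem.Str.slice resume_lower (some i) (some (i + L)))) s)
      PySem.Set.empty
  ((jd_keywords.filter (fun kw => PySem.Set.contains subs (PySem.Str.lower kw))).map PySem.Str.upper,
   (jd_keywords.filter (fun kw => !PySem.Set.contains subs (PySem.Str.lower kw))).map PySem.Str.upper)

-- ===== PRECONDITION & SPEC =====
def Spec_analyze_resume_keywords (resume_text : String) (jd_keywords : List String) (out : List String × List String) : Prop := out = analyze_resume_keywords_alt resume_text jd_keywords
instance (resume_text : String) (jd_keywords : List String) (out : List String × List String) : Decidable (Spec_analyze_resume_keywords resume_text jd_keywords out) := by unfold Spec_analyze_resume_keywords; infer_instance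

-- ===== CLAIM =====
def Claim_equal_analyze_resume_keywords : Prop := ∀ (resume_text : String) (jd_keywords : List String), Dom_analyze_resume_keywords resume_text jd_keywords → Spec_analyze_resume_keywords resume_text jd_keywords (analyze_resume_keywords resume_text jd_keywords)

-- ===== LEMMAS AND PROOFS =====

-- A's forward loop appends exactly the filtered, mapped keywords (generic predicate).
theorem foldlA_filter (p : String → Bool) (up : String → String) (l m ms : List String) :
    l.foldl
      (fun (acc : List String × List String) kw =>
        if p kw then (acc.1 ++ [up kw], acc.2) else (acc.1, acc.2 ++ [up kw]))
      (m, ms)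
    = (m ++ (l.filter p).map up, ms ++ (l.filter (fun kw => !p kw)).map up) := by
  induction l generalizing m ms with
  | nil => simp
  | cons kw t ih =>
    by_cases h : p kw = true
    · simp only [List.foldl_cons, h, if_true, ih, List.filter_cons, Bool.not_true, List.map_cons]
      simp
    · simp only [List.foldl_cons, h, ih, List.filter_cons]
      simp

-- membership in a fold that adds f a for each a
theorem mem_foldl_add {α : Type} (f : α → String) (l : List α) (s0 : PySem.Set String) (x : String) :
    x ∈ l.foldl (fun s a => PySem.Set.add s (f a)) s0 ↔ x ∈ s0 ∨ ∃ a ∈ l, x = f a := by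
  induction l generalizing s0 with
  | nil => simp
  | cons a t ih =>
    rw [List.foldl_cons, ih, PySem.Set.mem_add]
    constructor
    · rintro (⟨h | h⟩ | ⟨b, hb, hx⟩)
      · exact Or.inl h
      · exact Or.inr ⟨a, List.mem_cons_self, h⟩
      · exact Or.inr ⟨b, List.mem_cons_of_mem _ hb, hx⟩
    · rintro (h | ⟨b, hb, hx⟩)
      · exact Or.inl (Or.inl h)
      · rcases List.mem_cons.mp hb with rfl | hb
        · exact Or.inl (Or.inr hx)
        · exact Or.inr ⟨b, hb, hx⟩

-- membership in the nested substring-collecting fold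
theorem mem_foldl_nested (rng : Int → List Int) (g : Int → Int → String)
    (lens : List Int) (s0 : PySem.Set String) (x : String) :
    x ∈ lens.foldl (fun s L => (rng L).foldl (fun s i => PySem.Set.add s (g L i)) s) s0
    ↔ x ∈ s0 ∨ ∃ L ∈ lens, ∃ i ∈ rng L, x = g L i := by
  induction lens generalizing s0 with
  | nil => simp
  | cons L t ih =>
    rw [List.foldl_cons, ih, mem_foldl_add]
    constructor
    · rintro (⟨h | ⟨i, hi, hx⟩⟩ | ⟨L', hL', hx⟩)
      · exact Or.inl h
      · exact Or.inr ⟨L, List.mem_cons_self, i, hi, hx⟩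
      · exact Or.inr ⟨L', List.mem_cons_of_mem _ hL', hx⟩
    · rintro (h | ⟨L', hL', hx⟩)
      · exact Or.inl (Or.inl h)
      · rcases List.mem_cons.mp hL' with rfl | hL'
        · exact Or.inl (Or.inr hx)
        · exact Or.inr ⟨L', hL', hx⟩

-- lowering preserves length
theorem length_lower (s : String) : (PySem.Str.lower s).toList.length = s.toList.length := by
  rw [PySem.Str.toList_lower]
  simp [PySem.Chars.lower]

-- a take of a drop is an infix
theorem take_drop_infix {α : Type} (t : List α) (j m : Nat) :
    (t.drop j).take m <:+: t :=
  ((t.drop j).take_prefix m).isInfix.trans (t.drop_suffix j).isInfix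

-- the crux: membership of a string x (of length among the collected keyword lengths)
-- in the built substring set equals Python's substring test
theorem contains_subs_eq_isIn (resume_lower : String) (jd_keywords : List String) (kw : String)
    (hkw : kw ∈ jd_keywords) :
    PySem.Set.contains
      ((PySem.Set.ofList (jd_keywords.map (fun kw => PySem.Str.len kw))).foldl
        (fun s L =>
          (PySem.List.pyRange 0 (PySem.Str.len resume_lower - L + 1) 1).foldl
            (fun s i => PySem.Set.add s (PySem.Str.slice resume_lower (some i) (some (i + L)))) s)
        PySem.Set.empty)
      (PySem.Str.lower kw)
    = PySem.Str.isIn (PySem.Str.lower kw) resume_lower := by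
  have hlen : ∀ s : String, PySem.Str.len s = (s.toList.length : Int) := by
    intro s; simp [PySem.Str.len]
  have key : (PySem.Str.lower kw) ∈
      ((PySem.Set.ofList (jd_keywords.map (fun kw => PySem.Str.len kw))).foldl
        (fun s L =>
          (PySem.List.pyRange 0 (PySem.Str.len resume_lower - L + 1) 1).foldl
            (fun s i => PySem.Set.add s (PySem.Str.slice resume_lower (some i) (some (i + L)))) s)
        PySem.Set.empty)
      ↔ PySem.Str.isIn (PySem.Str.lower kw) resume_lower = true := by
    rw [mem_foldl_nested]
    constructor
    · rintro (h | ⟨L, hL, i, hi, hx⟩)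
      · simp [PySem.Set.empty] at h
      · -- the slice is an infix of the resume
        rcases PySem.List.mem_pyRange_one.mp hi with ⟨hi0, _⟩
        rcases (List.mem_map.mp ((PySem.Set.mem_ofList _ _).mp hL)) with ⟨kw', _, hLval⟩
        have hLnn : L = ((kw'.toList.length : Nat) : Int) := by rw [← hLval, hlen]
        rw [PySem.Str.isIn_iff_infix, hx, PySem.Str.toList_slice,
            PySem.Chars.slice_eq_listSlice]
        have hi' : i = ((i.toNat : Nat) : Int) := by omega
        rw [hi', hLnn, PySem.List.slice_natCast_add]
        exact take_drop_infix _ _ _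
    · intro hin
      rcases (PySem.Str.isIn_iff_infix _ _).mp hin with ⟨s, u, hsplit⟩
      refine Or.inr ⟨PySem.Str.len kw, (PySem.Set.mem_ofList _ _).mpr
        (List.mem_map.mpr ⟨kw, hkw, rfl⟩), (s.length : Int), ?_, ?_⟩
      · rw [PySem.List.mem_pyRange_one]
        have := congrArg List.length hsplit
        simp only [List.length_append] at this
        rw [hlen, hlen]
        constructor
        · omega
        · have hl := length_lower kw
          omega
      · rw [← String.toList_inj, PySem.Str.toList_slice, PySem.Chars.slice_eq_listSlice]
        have hkl : PySem.Str.len kw = (((PySem.Str.lower kw).toList.length : Nat) : Int) := by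
          rw [hlen, length_lower]
        rw [hkl, PySem.List.slice_natCast_add]
        have hdrop : resume_lower.toList.drop s.length = (PySem.Str.lower kw).toList ++ u := by
          rw [← hsplit, List.append_assoc, List.drop_left]
        rw [hdrop, List.take_left]
  cases hin : PySem.Str.isIn (PySem.Str.lower kw) resume_lower with
  | false =>
    rw [Bool.eq_false_iff]
    intro hcon
    exact (Bool.eq_false_iff.mp hin) (key.mp ((PySem.Set.contains_iff _ _).mp hcon))
  | true =>
    exact (PySem.Set.contains_iff _ _).mpr (key.mpr hin)

-- ===== VERDICT =====
theorem analyze_resume_keywords_spec : Claim_equal_analyze_resume_keywords := by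
  intro resume_text jd_keywords _
  unfold Spec_analyze_resume_keywords
  have hA : analyze_resume_keywords resume_text jd_keywords
      = ((jd_keywords.filter
            (fun kw => PySem.Str.isIn (PySem.Str.lower kw) (PySem.Str.lower resume_text))).map
            PySem.Str.upper,
         (jd_keywords.filter
            (fun kw => !PySem.Str.isIn (PySem.Str.lower kw) (PySem.Str.lower resume_text))).map
            PySem.Str.upper) := by
    unfold analyze_resume_keywords
    rw [foldlA_filter]
    simp
  have hB : analyze_resume_keywords_alt resume_text jd_keywords
      = ((jd_keywords.filter (fun kw => PySem.Set.contains
            ((PySem.Set.ofList (jd_keywords.map (fun kw => PySem.Str.len kw))).foldl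
              (fun s L =>
                (PySem.List.pyRange 0 (PySem.Str.len (PySem.Str.lower resume_text) - L + 1) 1).foldl
                  (fun s i => PySem.Set.add s
                    (PySem.Str.slice (PySem.Str.lower resume_text) (some i) (some (i + L)))) s)
              PySem.Set.empty)
            (PySem.Str.lower kw))).map PySem.Str.upper,
         (jd_keywords.filter (fun kw => !PySem.Set.contains
            ((PySem.Set.ofList (jd_keywords.map (fun kw => PySem.Str.len kw))).foldl
              (fun s L =>
                (PySem.List.pyRange 0 (PySem.Str.len (PySem.Str.lower resume_text) - L + 1) 1).foldl
                  (fun s i => PySem.Set.add s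
                    (PySem.Str.slice (PySem.Str.lower resume_text) (some i) (some (i + L)))) s)
              PySem.Set.empty)
            (PySem.Str.lower kw))).map PySem.Str.upper) := rfl
  rw [hA, hB]
  have h1 := List.filter_congr (l := jd_keywords)
    (fun kw hkw => (contains_subs_eq_isIn (PySem.Str.lower resume_text) jd_keywords kw hkw).symm)
  have h2 := List.filter_congr (l := jd_keywords)
    (fun kw hkw => congrArg (fun b => !b)
      (contains_subs_eq_isIn (PySem.Str.lower resume_text) jd_keywords kw hkw).symm)
  rw [h1, h2]
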